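-- pv_equiv track=rewrite | github.com/FitxWD/Backend | app/utils/plan_utils.py | find_nearest_calorie_bracket
-- ===== SOURCE A (Python) =====
-- def find_nearest_calorie_bracket(calories: int) -> str:
--     """Find the nearest calorie bracket in steps of 200"""
--     base_calories = 1700
--     max_calories = 3100
--     step = 200
--
--     # Find nearest bracket
--     nearest = base_calories
--     min_diff = abs(calories - base_calories)
--
--     current = base_calories
--     while current <= max_calories:
--         diff = abs(calories - current)
--         if diff < min_diff:
--             min_diff = diff
--             nearest = current
--         current += step
--
--     return str(nearest)
-- ===== SOURCE B (Python) =====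
-- def find_nearest_calorie_bracket(calories: int) -> str:
--     """Nearest bracket in [1700, 3100] step 200, ties toward the lower bracket."""
--     i = (calories - 1601) // 200  # round (calories-1700)/200 to nearest, ties down
--     i = max(0, min(7, i))
--     return str(1700 + 200 * i)
-- ===== Notes on version B (the rewrite author's own statement) =====
-- stated objective: simpler
-- what changed: Replaced the bracket-by-bracket scan keeping a running (nearest, min_diff) pair with a closed-form computation: round to the nearest bracket index with ties down via one integer floor-division, clamp the index, and format.
import Mathlib
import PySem

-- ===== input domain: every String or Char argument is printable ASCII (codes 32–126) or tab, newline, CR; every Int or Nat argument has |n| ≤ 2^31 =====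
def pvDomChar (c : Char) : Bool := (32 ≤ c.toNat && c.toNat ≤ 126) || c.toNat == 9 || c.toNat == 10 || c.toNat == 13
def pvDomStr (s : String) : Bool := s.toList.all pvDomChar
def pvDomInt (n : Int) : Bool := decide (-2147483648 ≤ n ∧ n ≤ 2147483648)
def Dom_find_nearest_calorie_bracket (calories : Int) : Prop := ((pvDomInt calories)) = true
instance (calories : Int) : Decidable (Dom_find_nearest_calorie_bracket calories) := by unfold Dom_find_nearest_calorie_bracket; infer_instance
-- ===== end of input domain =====

set_option maxHeartbeats 2000000


-- B replaces A's scan over the 8 brackets with a closed-form ties-down rounding + clamp (objective: simpler).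

-- ===== PORT A =====
-- while loop over current = 1700, 1900, …, 3100 ported as a fold over that arithmetic range;
-- abs on ints ported as Int.natAbs cast back to Int (exact for Python's abs).
def find_nearest_calorie_bracket (calories : Int) : String :=
  let base : Int := 1700
  let maxc : Int := 3100
  let step : Int := 200
  let st :=
    (PySem.List.pyRange base (maxc + 1) step).foldl
      (fun (st : Int × Int) current =>
        let diff : Int := ((calories - current).natAbs : Int)
        if diff < st.2 then (current, diff) else st)
      (base, ((calories - base).natAbs : Int))
  PySem.Int.toStr st.1

-- ===== PORT B =====
def find_nearest_calorie_bracket_alt (calories : Int) : String :=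
  let i := PySem.Int.floordiv (calories - 1601) 200
  let i := max 0 (min 7 i)
  PySem.Int.toStr (1700 + 200 * i)

-- ===== PRECONDITION & SPEC =====
def Spec_find_nearest_calorie_bracket (calories : Int) (out : String) : Prop := out = find_nearest_calorie_bracket_alt calories
instance (calories : Int) (out : String) : Decidable (Spec_find_nearest_calorie_bracket calories out) := by unfold Spec_find_nearest_calorie_bracket; infer_instance

-- ===== CLAIM (what is proved, stated in full; the proofs are below) =====
def Claim_equal_find_nearest_calorie_bracket : Prop := ∀ (calories : Int), Dom_find_nearest_calorie_bracket calories → Spec_find_nearest_calorie_bracket calories (find_nearest_calorie_bracket calories)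

-- ===== LEMMAS AND PROOFS =====

lemma pyRange_brackets :
    PySem.List.pyRange (1700 : Int) 3101 200 = [1700, 1900, 2100, 2300, 2500, 2700, 2900, 3100] := by
  decide

-- ===== VERDICT (by name: the statement is the Claim_ definition above) =====
theorem find_nearest_calorie_bracket_spec : Claim_equal_find_nearest_calorie_bracket := by
  intro c _
  unfold Spec_find_nearest_calorie_bracket find_nearest_calorie_bracket find_nearest_calorie_bracket_alt
  dsimp only
  rw [show ((3100 : Int) + 1) = 3101 by norm_num, pyRange_brackets]
  rw [PySem.Int.floordiv_eq_ediv_of_pos (by norm_num)]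
  simp only [List.foldl, apply_ite (Prod.snd : Int × Int → Int),
    apply_ite (Prod.fst : Int × Int → Int), lt_self_iff_false, if_false]
  refine congrArg PySem.Int.toStr ?_
  split_ifs <;> omega
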